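-- pv_equiv track=rewrite | github.com/venugopalrohit/code_samples | find_duplicates_in_string.py | find_dup_using_hash
-- ===== SOURCE A (Python) =====
-- def find_dup_using_hash(input_str):
--     # Assuming ASCII set. There can only be 128 unique characters. If greater, then at least one has been repeated
--     if (len(input_str) > 128):
--         return False
--     # Creating empty hash to hold the unique characters
--     char_hash = {}
--     for ch in input_str:
--         if(ch in char_hash):
--             return False
--         else:
--             char_hash[ch] = 0
--
--     return True
-- ===== SOURCE B (Python) =====
-- def find_dup_using_hash(input_str):
--     # ASCII pigeonhole guard, same as A: >128 chars must contain a repeat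
--     if len(input_str) > 128:
--         return False
--     # Sort the characters; any duplicate becomes adjacent, so one linear
--     # scan of neighbouring pairs decides uniqueness.
--     chars = sorted(input_str)
--     for i in range(len(chars) - 1):
--         if chars[i] == chars[i + 1]:
--             return False
--     return True
-- ===== Notes on version B (the rewrite author's own statement) =====
-- stated objective: alternative
-- what changed: Replaces the hash-based membership loop with sort-then-adjacent-scan: sort the characters so duplicates become neighbours, then compare each adjacent pair.
import Mathlib
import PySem

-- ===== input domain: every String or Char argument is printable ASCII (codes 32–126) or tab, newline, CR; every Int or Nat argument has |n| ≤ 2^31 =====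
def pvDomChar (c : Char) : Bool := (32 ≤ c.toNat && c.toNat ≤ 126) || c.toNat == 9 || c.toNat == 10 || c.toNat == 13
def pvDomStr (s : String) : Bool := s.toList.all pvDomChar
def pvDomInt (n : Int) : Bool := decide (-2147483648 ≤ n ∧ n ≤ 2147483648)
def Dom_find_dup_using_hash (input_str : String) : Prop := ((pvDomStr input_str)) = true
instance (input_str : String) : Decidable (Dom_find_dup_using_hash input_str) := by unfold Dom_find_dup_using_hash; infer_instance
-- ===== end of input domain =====

-- B replaces A's hash-membership loop by sort-then-adjacent-scan: sorting makes any
-- duplicate adjacent, so one pass over neighbouring pairs decides uniqueness (alternative).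

-- ===== PORT A =====
-- the 'for ch in input_str' loop carrying char_hash, with early return on duplicate
def pvLoopA (d : PySem.Dict Char Int) : List Char → Bool
  | [] => true
  | ch :: rest => if d.contains ch then false else pvLoopA (d.insert ch 0) rest

def find_dup_using_hash (input_str : String) : Bool :=
  if (PySem.Str.len input_str) > 128 then false
  else pvLoopA PySem.Dict.empty input_str.toList

-- ===== PORT B =====
-- the 'for i in range(len(chars)-1): if chars[i] == chars[i+1]: return False' scan,
-- as the obvious structural recursion over adjacent pairs of the sorted list
def pvAdjScan : List Char → Bool
  | a :: b :: rest => if a = b then false else pvAdjScan (b :: rest)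
  | _ => true

def find_dup_using_hash_alt (input_str : String) : Bool :=
  if (PySem.Str.len input_str) > 128 then false
  else pvAdjScan (PySem.List.sorted input_str.toList (fun x => x) false)

-- ===== PRECONDITION & SPEC =====
def Spec_find_dup_using_hash (input_str : String) (out : Bool) : Prop := out = find_dup_using_hash_alt input_str
instance (input_str : String) (out : Bool) : Decidable (Spec_find_dup_using_hash input_str out) := by unfold Spec_find_dup_using_hash; infer_instance

-- ===== CLAIM (what is proved, stated in full; the proofs are below) =====
def Claim_equal_find_dup_using_hash : Prop := ∀ (input_str : String), Dom_find_dup_using_hash input_str → Spec_find_dup_using_hash input_str (find_dup_using_hash input_str)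

-- ===== LEMMAS AND PROOFS =====

-- A's loop succeeds iff the remaining characters are distinct and all fresh w.r.t. the dict
theorem pvLoopA_iff (cs : List Char) : ∀ (d : PySem.Dict Char Int),
    pvLoopA d cs = true ↔ (cs.Nodup ∧ ∀ c ∈ cs, d.contains c = false) := by
  induction cs with
  | nil => intro d; simp [pvLoopA]
  | cons ch rest ih =>
    intro d
    simp only [pvLoopA]
    cases hb : d.contains ch with
    | true =>
      simp only [if_true]
      constructor
      · intro hfalse; exact absurd hfalse (by simp)
      · rintro ⟨_, hall⟩
        have := hall ch (List.mem_cons_self ..)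
        rw [hb] at this; cases this
    | false =>
      simp only [Bool.false_eq_true, if_false, ih]
      constructor
      · rintro ⟨hnd, hall⟩
        refine ⟨List.nodup_cons.mpr ⟨?_, hnd⟩, ?_⟩
        · intro hmem
          have := hall ch hmem
          rw [PySem.Dict.contains_insert] at this
          simp at this
        · intro c hc
          rcases List.mem_cons.mp hc with rfl | hc'
          · exact hb
          · have := hall c hc'
            rw [PySem.Dict.contains_insert] at this
            simp at this
            exact this.2
      · rintro ⟨hnd, hall⟩
        have hnd' := List.nodup_cons.mp hnd
        refine ⟨hnd'.2, ?_⟩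
        intro c hc
        rw [PySem.Dict.contains_insert]
        have h1 : d.contains c = false := hall c (List.mem_cons_of_mem _ hc)
        have h2 : c ≠ ch := fun he => hnd'.1 (he ▸ hc)
        simp [h1, h2]

-- B's adjacent scan succeeds iff no two neighbours are equal
theorem pvAdjScan_iff (xs : List Char) :
    pvAdjScan xs = true ↔ List.IsChain (· ≠ ·) xs := by
  induction xs with
  | nil => simp [pvAdjScan]
  | cons a tail ih =>
    cases tail with
    | nil => simp [pvAdjScan]
    | cons b rest =>
      rw [List.isChain_cons_cons]
      simp only [pvAdjScan]
      by_cases hab : a = b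
      · simp [hab]
      · simp only [hab, if_false, ih, ne_eq, not_false_iff, true_and]

-- a pairwise relation holds in particular on neighbours
theorem pairwise_isChain {R : Char → Char → Prop} (xs : List Char)
    (h : xs.Pairwise R) : List.IsChain R xs := by
  induction xs with
  | nil => exact List.isChain_nil
  | cons a tail ih =>
    rcases List.pairwise_cons.mp h with ⟨ha, ht⟩
    cases tail with
    | nil => exact List.isChain_singleton a
    | cons b rest =>
      exact List.isChain_cons_cons.mpr ⟨ha b (List.mem_cons_self ..), ih ht⟩

-- on a (≤)-pairwise list, no equal neighbours is the same as no duplicates at all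
theorem chain_ne_iff_nodup (xs : List Char) (hs : xs.Pairwise (· ≤ ·)) :
    List.IsChain (· ≠ ·) xs ↔ xs.Nodup := by
  constructor
  · intro hc
    have hlt : List.IsChain (· < ·) xs := by
      induction xs with
      | nil => exact List.isChain_nil
      | cons a tail ih =>
        rw [List.pairwise_cons] at hs
        cases tail with
        | nil => exact List.isChain_singleton a
        | cons b rest =>
          rw [List.isChain_cons_cons] at hc ⊢
          exact ⟨lt_of_le_of_ne (hs.1 b (List.mem_cons_self ..)) hc.1,
            ih hs.2 hc.2⟩
    exact (List.isChain_iff_pairwise.mp hlt).imp ne_of_lt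
  · intro hnd
    exact pairwise_isChain xs hnd

-- ===== VERDICT (by name: the statement is the Claim_ definition above) =====
theorem find_dup_using_hash_spec : Claim_equal_find_dup_using_hash := by
  intro s _
  unfold Spec_find_dup_using_hash find_dup_using_hash find_dup_using_hash_alt
  by_cases hlen : (PySem.Str.len s) > 128
  · rw [if_pos hlen, if_pos hlen]
  · rw [if_neg hlen, if_neg hlen]
    have hperm := PySem.List.sorted_perm s.toList (fun x => x) false
    have hpair := PySem.List.sorted_pairwise s.toList (fun x => x)
    have hnd : (PySem.List.sorted s.toList (fun x => x) false).Nodup ↔ s.toList.Nodup :=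
      hperm.nodup_iff
    cases hb : pvLoopA PySem.Dict.empty s.toList with
    | true =>
      symm
      rw [pvAdjScan_iff, chain_ne_iff_nodup _ hpair, hnd]
      exact ((pvLoopA_iff s.toList PySem.Dict.empty).mp hb).1
    | false =>
      symm
      rw [← Bool.not_eq_true, pvAdjScan_iff, chain_ne_iff_nodup _ hpair, hnd]
      intro hc
      have := (pvLoopA_iff s.toList PySem.Dict.empty).mpr
        ⟨hc, fun c _ => PySem.Dict.contains_empty c⟩
      rw [hb] at this; cases this
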